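-- pv_equiv track=rewrite | github.com/jinman-kim/algo | 주식가격.py | solution
-- ===== SOURCE A (Python) =====
-- def solution(prices):
--     answer = [0]*len(prices)
--     for i in range(len(prices)):
--         cnt = 0
--         for j in range(i+1,len(prices)):
--             if prices[i] <= prices[j]:
--                 cnt += 1
--                 answer[i]=cnt
--             else:
--                 cnt += 1
--                 answer[i]=cnt
--                 break
--     return answer
-- ===== SOURCE B (Python) =====
-- def solution(prices):
--     n = len(prices)
--     answer = [0] * n
--     stack = []  # indices with no price drop seen yet; prices non-increasing from top
--     for i, p in enumerate(prices):
--         while stack and prices[stack[-1]] > p: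
--             j = stack.pop()
--             answer[j] = i - j
--         stack.append(i)
--     while stack:
--         j = stack.pop()
--         answer[j] = n - 1 - j
--     return answer
-- ===== Notes on version B (the rewrite author's own statement) =====
-- stated objective: faster
-- what changed: Replaces the quadratic per-index forward scan with a single pass using a monotonic stack that resolves each index's duration when its first lower price arrives.
import Mathlib
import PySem

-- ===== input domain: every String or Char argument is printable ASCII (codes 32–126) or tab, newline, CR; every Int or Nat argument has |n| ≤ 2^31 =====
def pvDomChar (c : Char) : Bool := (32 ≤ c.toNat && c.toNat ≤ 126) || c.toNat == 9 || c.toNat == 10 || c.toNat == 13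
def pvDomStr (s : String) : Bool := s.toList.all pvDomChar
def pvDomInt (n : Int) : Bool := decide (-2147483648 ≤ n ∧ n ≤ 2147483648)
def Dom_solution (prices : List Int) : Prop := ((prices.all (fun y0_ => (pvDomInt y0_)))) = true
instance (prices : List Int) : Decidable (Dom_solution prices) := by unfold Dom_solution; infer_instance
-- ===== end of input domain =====

-- B replaces A's quadratic per-index forward scan with a one-pass monotonic stack (objective: faster).

-- ===== PORT A =====
-- A's inner `for j in range(i+1, n)` loop with break; indices i, j are always in
-- range where A reads prices[i], prices[j], so `getD _ 0` is exact there.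
def solInner (prices : List Int) (i : Nat) (j : Nat) (cnt : Int) (ans : List Int) : List Int :=
  if _h : j < prices.length then
    if prices.getD i 0 ≤ prices.getD j 0 then
      solInner prices i (j + 1) (cnt + 1) (ans.set i (cnt + 1))
    else ans.set i (cnt + 1)
  else ans
termination_by prices.length - j

def solution (prices : List Int) : List Int :=
  (List.range prices.length).foldl (fun ans i => solInner prices i (i + 1) 0 ans)
    (List.replicate prices.length 0)

-- ===== PORT B =====
-- Source B's `while stack and prices[stack[-1]] > p` pop loop (stack top = list head).
def altPops (prices : List Int) (i : Nat) (p : Int) (stack : List Nat) (ans : List Int) :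
    List Nat × List Int :=
  match stack with
  | [] => ([], ans)
  | j :: rest =>
      if p < prices.getD j 0 then altPops prices i p rest (ans.set j ((i : Int) - (j : Int)))
      else (j :: rest, ans)

-- Source B's final `while stack` drain loop.
def altFinish (n : Nat) (stack : List Nat) (ans : List Int) : List Int :=
  match stack with
  | [] => ans
  | j :: rest => altFinish n rest (ans.set j ((n : Int) - 1 - (j : Int)))

def solution_alt (prices : List Int) : List Int :=
  let n := prices.length
  let st := (List.range n).foldl
    (fun (st : List Nat × List Int) i =>
      let r := altPops prices i (prices.getD i 0) st.1 st.2
      (i :: r.1, r.2))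
    ([], List.replicate n 0)
  altFinish n st.1 st.2

-- ===== PRECONDITION & SPEC =====
def Spec_solution (prices : List Int) (out : List Int) : Prop := out = solution_alt prices
instance (prices : List Int) (out : List Int) : Decidable (Spec_solution prices out) := by unfold Spec_solution; infer_instance

-- ===== CLAIM (what is proved, stated in full; the proofs are below) =====
def Claim_equal_solution : Prop := ∀ (prices : List Int), Dom_solution prices → Spec_solution prices (solution prices)

-- ===== LEMMAS AND PROOFS =====

-- index of the first j' ≥ j with prices[j'] < prices[i]
def fd (prices : List Int) (i j : Nat) : Option Nat :=
  if _h : j < prices.length then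
    if prices.getD j 0 < prices.getD i 0 then some j else fd prices i (j + 1)
  else none
termination_by prices.length - j

-- the value A stores at index i
def specf (prices : List Int) (i : Nat) : Int :=
  match fd prices i (i + 1) with
  | some d => (d : Int) - (i : Int)
  | none => (prices.length : Int) - 1 - (i : Int)

lemma getD_set' (a : List Int) (j k : Nat) (v : Int) :
    (a.set j v).getD k 0 = if j = k ∧ j < a.length then v else a.getD k 0 := by
  simp only [List.getD_eq_getElem?_getD, List.getElem?_set]
  split_ifs with h1 h2 h3 h3 <;> simp_all <;> omega

lemma fd_step (prices : List Int) (i j : Nat) (h1 : j < prices.length) :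
    fd prices i j =
      if prices.getD j 0 < prices.getD i 0 then some j else fd prices i (j + 1) := by
  conv_lhs => rw [fd]
  rw [dif_pos h1]

lemma fd_end (prices : List Int) (i j : Nat) (h1 : ¬ j < prices.length) :
    fd prices i j = none := by
  rw [fd, dif_neg h1]

lemma fd_none_of (prices : List Int) (i j : Nat)
    (h : ∀ k, j ≤ k → k < prices.length → prices.getD i 0 ≤ prices.getD k 0) :
    fd prices i j = none := by
  by_cases h1 : j < prices.length
  · rw [fd_step prices i j h1, if_neg (not_lt.mpr (h j le_rfl h1))]
    exact fd_none_of prices i (j + 1) (fun k hk hk' => h k (by omega) hk')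
  · exact fd_end prices i j h1
termination_by prices.length - j

lemma fd_some_of (prices : List Int) (i j d : Nat) (hj : j ≤ d) (hd : d < prices.length)
    (hlt : prices.getD d 0 < prices.getD i 0)
    (hall : ∀ k, j ≤ k → k < d → prices.getD i 0 ≤ prices.getD k 0) :
    fd prices i j = some d := by
  rcases eq_or_lt_of_le hj with rfl | hjd
  · rw [fd_step prices i j hd, if_pos hlt]
  · have hjn : j < prices.length := lt_trans hjd hd
    have hge : prices.getD i 0 ≤ prices.getD j 0 := hall j le_rfl hjd
    rw [fd_step prices i j hjn, if_neg (not_lt.mpr hge)]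
    exact fd_some_of prices i (j + 1) d (by omega) hd hlt (fun k hk hk' => hall k (by omega) hk')
termination_by d - j

-- A's inner loop computes: set answer[i] to the spec value (untouched when the loop is empty)
lemma solInner_eq (prices : List Int) (i : Nat) : ∀ j ans, i + 1 ≤ j →
    solInner prices i j ((j : Int) - (i : Int) - 1) ans =
      match fd prices i j with
      | some d => ans.set i ((d : Int) - (i : Int))
      | none => if j < prices.length then ans.set i ((prices.length : Int) - 1 - (i : Int)) else ans := by
  intro j ans hij
  unfold solInner
  split_ifs with h1 h2
  · -- continue branch
    rw [fd_step prices i j h1, if_neg (not_lt.mpr h2)]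
    have hc : ((j : Int) - (i : Int) - 1) + 1 = ((j + 1 : Nat) : Int) - (i : Int) - 1 := by push_cast; ring
    rw [hc, solInner_eq prices i (j + 1) (ans.set i (((j + 1 : Nat) : Int) - (i : Int) - 1)) (by omega)]
    cases hfd : fd prices i (j + 1) with
    | some d => simp [List.set_set]
    | none =>
      by_cases hj1 : j + 1 < prices.length
      · simp [hj1, List.set_set]
      · simp only [if_neg hj1, List.set_set]
        congr 1
        push_cast
        omega
  · -- break branch
    rw [fd_step prices i j h1, if_pos (not_le.mp h2)]
    congr 1
    ring
  · rw [fd_end prices i j h1]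
termination_by j => prices.length - j

lemma map_range_set (n m : Nat) (hm : m < n) (f : Nat → Int) (v : Int) :
    ((List.range n).map f).set m v = (List.range n).map (fun k => if k = m then v else f k) := by
  apply List.ext_getElem
  · simp
  · intro k hk hk'
    simp only [List.length_set, List.length_map, List.length_range] at hk
    rw [List.getElem_set]
    by_cases h : m = k
    · simp [h, hk]
    · simp only [if_neg h, List.getElem_map, List.getElem_range]
      rw [if_neg (fun h' : k = m => h h'.symm)]

-- A's outer loop: after processing indices < m, entry k holds specf for k < m, else 0
lemma outerA (prices : List Int) : ∀ m, m ≤ prices.length →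
    (List.range m).foldl (fun ans i => solInner prices i (i + 1) 0 ans)
        (List.replicate prices.length 0) =
      (List.range prices.length).map (fun k => if k < m then specf prices k else 0) := by
  intro m
  induction m with
  | zero =>
    intro _
    simp only [List.range_zero, List.foldl_nil]
    apply List.ext_getElem <;> simp
  | succ m ih =>
    intro hm
    rw [List.range_succ, List.foldl_append, ih (by omega), List.foldl_cons, List.foldl_nil]
    have hs := solInner_eq prices m (m + 1)
      ((List.range prices.length).map (fun k => if k < m then specf prices k else 0)) le_rfl
    have hz : ((m + 1 : Nat) : Int) - (m : Int) - 1 = 0 := by push_cast; ring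
    rw [hz] at hs
    rw [hs]
    have hmn : m < prices.length := by omega
    cases hfd : fd prices m (m + 1) with
    | some d =>
      simp only [map_range_set prices.length m hmn]
      apply List.map_congr_left
      intro k hk
      by_cases h : k = m
      · subst h; simp [specf, hfd]
      · simp only [if_neg h]
        exact if_congr (by omega) rfl rfl
    | none =>
      by_cases hj1 : m + 1 < prices.length
      · simp only [if_pos hj1, map_range_set prices.length m hmn]
        apply List.map_congr_left
        intro k hk
        by_cases h : k = m
        · subst h; simp [specf, hfd]
        · simp only [if_neg h]
          exact if_congr (by omega) rfl rfl
      · -- m = n - 1: loop body never ran, answer[m] stays 0 = specf m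
        simp only [if_neg hj1]
        apply List.map_congr_left
        intro k hk
        rw [List.mem_range] at hk
        by_cases h : k = m
        · subst h
          have : specf prices k = 0 := by
            unfold specf
            rw [hfd]
            push_cast
            omega
          simp [this]
        · exact if_congr (by omega) rfl rfl

lemma solution_eq_map (prices : List Int) :
    solution prices = (List.range prices.length).map (specf prices) := by
  unfold solution
  rw [outerA prices prices.length le_rfl]
  apply List.map_congr_left
  intro k hk
  rw [List.mem_range] at hk
  simp [hk]

-- ===== B side =====

-- no price strictly below prices[j] occurs in positions (j, m)
def NoDrop (prices : List Int) (j m : Nat) : Prop :=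
  ∀ k, j < k → k < m → prices.getD j 0 ≤ prices.getD k 0

-- stack invariant after processing indices < m
def StackInv (prices : List Int) (m : Nat) (st : List Nat) (ans : List Int) : Prop :=
  ans.length = prices.length ∧
  List.Pairwise (fun a b => b < a ∧ prices.getD b 0 ≤ prices.getD a 0) st ∧
  (∀ j, j ∈ st ↔ (j < m ∧ NoDrop prices j m)) ∧
  (∀ k, ans.getD k 0 = if k < m ∧ k ∉ st then specf prices k else 0)

lemma altPops_eq (prices : List Int) (m : Nat) (p : Int) : ∀ st ans,
    altPops prices m p st ans =
      (st.dropWhile (fun j => decide (p < prices.getD j 0)),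
       (st.takeWhile (fun j => decide (p < prices.getD j 0))).foldl
         (fun a j => a.set j ((m : Int) - (j : Int))) ans) := by
  intro st
  induction st with
  | nil => intro ans; simp [altPops]
  | cons j t ih =>
    intro ans
    simp only [altPops, List.dropWhile_cons, List.takeWhile_cons, decide_eq_true_eq]
    by_cases h : p < prices.getD j 0
    · rw [if_pos h, if_pos h, if_pos h, ih, List.foldl_cons]
    · rw [if_neg h, if_neg h, if_neg h, List.foldl_nil]

lemma foldl_set_char (m : Nat) : ∀ (L : List Nat) (ans : List Int), (∀ j ∈ L, j < ans.length) →
    (L.foldl (fun a j => a.set j ((m : Int) - (j : Int))) ans).length = ans.length ∧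
    ∀ k, (L.foldl (fun a j => a.set j ((m : Int) - (j : Int))) ans).getD k 0 =
      if k ∈ L then (m : Int) - (k : Int) else ans.getD k 0 := by
  intro L
  induction L with
  | nil => intro ans _; simp
  | cons j t ih =>
    intro ans hL
    have hj : j < ans.length := hL j (by simp)
    have ht : ∀ x ∈ t, x < (ans.set j ((m : Int) - (j : Int))).length := by
      intro x hx; rw [List.length_set]; exact hL x (by simp [hx])
    obtain ⟨hlen, hch⟩ := ih (ans.set j ((m : Int) - (j : Int))) ht
    rw [List.foldl_cons]
    refine ⟨by rw [hlen, List.length_set], ?_⟩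
    intro k
    rw [hch k, getD_set' ans j k]
    by_cases hkt : k ∈ t
    · simp [hkt]
    · by_cases hkj : j = k
      · subst hkj; simp [hkt, hj]
      · have hne : k ∉ j :: t := by
          intro hc
          rcases List.mem_cons.mp hc with rfl | hc'
          · exact hkj rfl
          · exact hkt hc'
        simp [hkt, hkj, hne]

lemma pairwise_drop_le (prices : List Int) (p : Int) : ∀ (st : List Nat),
    List.Pairwise (fun a b => b < a ∧ prices.getD b 0 ≤ prices.getD a 0) st →
    ∀ j ∈ st.dropWhile (fun j => decide (p < prices.getD j 0)), prices.getD j 0 ≤ p := by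
  intro st
  induction st with
  | nil => simp
  | cons a t ih =>
    intro hpw j hj
    rw [List.dropWhile_cons] at hj
    by_cases h : p < prices.getD a 0
    · rw [if_pos (by simpa)] at hj
      exact ih hpw.of_cons j hj
    · rw [if_neg (by simp only [decide_eq_true_eq]; exact h)] at hj
      rcases List.mem_cons.mp hj with rfl | hjt
      · simp only [List.getD_eq_getElem?_getD] at h ⊢
        omega
      · have h2 := (List.pairwise_cons.mp hpw).1 j hjt
        simp only [List.getD_eq_getElem?_getD] at h h2 ⊢
        omega

-- one iteration of Source B's main loop preserves the invariant
lemma step_inv (prices : List Int) (m : Nat) (hm : m < prices.length) (st : List Nat) (ans : List Int)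
    (hinv : StackInv prices m st ans) :
    StackInv prices (m + 1)
      (m :: (altPops prices m (prices.getD m 0) st ans).1)
      (altPops prices m (prices.getD m 0) st ans).2 := by
  obtain ⟨hlen, hpw, hmem, hans⟩ := hinv
  set p := prices.getD m 0 with hp
  set f : Nat → Bool := fun j => decide (p < prices.getD j 0) with hf
  rw [altPops_eq]
  set keep := st.dropWhile f with hkeep
  set pop := st.takeWhile f with hpop
  have hsplit : pop ++ keep = st := List.takeWhile_append_dropWhile
  have hmem_st : ∀ j, j ∈ st ↔ j ∈ pop ∨ j ∈ keep := by
    intro j; rw [← hsplit, List.mem_append]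
  have hpop_f : ∀ j ∈ pop, p < prices.getD j 0 := by
    intro j hj
    have := List.mem_takeWhile_imp hj
    simpa [hf] using this
  have hkeep_le : ∀ j ∈ keep, prices.getD j 0 ≤ p := pairwise_drop_le prices p st hpw
  have hpop_lt : ∀ j ∈ pop, j < ans.length := by
    intro j hj
    have := (hmem j).mp ((hmem_st j).mpr (Or.inl hj))
    omega
  obtain ⟨hlen', hch⟩ := foldl_set_char m pop ans hpop_lt
  have hdisj : ∀ j, j ∈ pop → j ∈ keep → False := by
    have := hpw
    rw [← hsplit, List.pairwise_append] at this
    intro j h1 h2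
    exact absurd (this.2.2 j h1 j h2).1 (lt_irrefl j)
  have hkeep_pw : List.Pairwise (fun a b => b < a ∧ prices.getD b 0 ≤ prices.getD a 0) keep :=
    hpw.sublist (hkeep ▸ List.dropWhile_sublist f)
  have hkeep_mem : ∀ j ∈ keep, j < m ∧ NoDrop prices j m := by
    intro j hj; exact (hmem j).mp ((hmem_st j).mpr (Or.inr hj))
  refine ⟨hlen'.trans hlen, ?_, ?_, ?_⟩
  · -- pairwise on m :: keep
    rw [List.pairwise_cons]
    exact ⟨fun j hj => ⟨(hkeep_mem j hj).1, hkeep_le j hj⟩, hkeep_pw⟩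
  · -- membership characterization at m+1
    intro j
    constructor
    · intro hj
      rcases List.mem_cons.mp hj with rfl | hjk
      · exact ⟨by omega, by intro k hk hk'; omega⟩
      · obtain ⟨hjm, hnd⟩ := hkeep_mem j hjk
        refine ⟨by omega, fun k hk hk' => ?_⟩
        by_cases hkm : k = m
        · subst hkm; exact hkeep_le j hjk
        · exact hnd k hk (by omega)
    · rintro ⟨hjm1, hnd⟩
      by_cases hjm : j = m
      · subst hjm; exact List.mem_cons_self
      · have hjm' : j < m := by omega
        have hndm : NoDrop prices j m := fun k hk hk' => hnd k hk (by omega)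
        have hjst : j ∈ st := (hmem j).mpr ⟨hjm', hndm⟩
        rcases (hmem_st j).mp hjst with hjp | hjk
        · exact absurd (hnd m hjm' (Nat.lt_succ_self m)) (not_le.mpr (hpop_f j hjp))
        · exact List.mem_cons_of_mem m hjk
  · -- answer characterization
    intro k
    rw [hch k]
    by_cases hkp : k ∈ pop
    · -- popped: gets m - k = specf k
      have hkst : k ∈ st := (hmem_st k).mpr (Or.inl hkp)
      obtain ⟨hkm, hnd⟩ := (hmem k).mp hkst
      have hfd : fd prices k (k + 1) = some m := by
        apply fd_some_of prices k (k + 1) m (by omega) hm (hpop_f k hkp)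
        intro x hx hx'
        exact hnd x (by omega) hx'
      have hspec : specf prices k = (m : Int) - (k : Int) := by unfold specf; rw [hfd]
      have hknotnew : k ∉ m :: keep := by
        intro h
        rcases List.mem_cons.mp h with rfl | hk
        · omega
        · exact hdisj k hkp hk
      rw [if_pos hkp, if_pos ⟨by omega, hknotnew⟩, hspec]
    · -- not popped: value unchanged, classification consistent
      rw [if_neg hkp, hans k]
      by_cases hkk : k ∈ keep
      · have hknew : k ∈ m :: keep := List.mem_cons_of_mem m hkk
        have hkst : k ∈ st := (hmem_st k).mpr (Or.inr hkk)
        simp [hkst, hknew]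
      · by_cases hkm : k = m
        · subst hkm
          have hknotst : k ∉ st := fun h => absurd ((hmem k).mp h).1 (lt_irrefl k)
          simp [List.mem_cons]
        · have hknotst : k ∉ st := fun h => (hmem_st k).mp h |>.elim hkp hkk
          have hknotnew : k ∉ m :: keep := by
            intro h; rcases List.mem_cons.mp h with rfl | h'
            · exact hkm rfl
            · exact hkk h'
          have : (k < m + 1 ∧ k ∉ m :: keep) ↔ (k < m ∧ k ∉ st) := by
            constructor
            · rintro ⟨h1, _⟩; exact ⟨by omega, hknotst⟩
            · rintro ⟨h1, _⟩; exact ⟨by omega, hknotnew⟩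
          by_cases hcl : k < m ∧ k ∉ st
          · rw [if_pos hcl, if_pos (this.mpr hcl)]
          · rw [if_neg hcl, if_neg (fun h => hcl (this.mp h))]

lemma fold_inv (prices : List Int) : ∀ m, m ≤ prices.length →
    StackInv prices m
      ((List.range m).foldl
        (fun (st : List Nat × List Int) i =>
          let r := altPops prices i (prices.getD i 0) st.1 st.2
          (i :: r.1, r.2))
        ([], List.replicate prices.length 0)).1
      ((List.range m).foldl
        (fun (st : List Nat × List Int) i =>
          let r := altPops prices i (prices.getD i 0) st.1 st.2
          (i :: r.1, r.2))
        ([], List.replicate prices.length 0)).2 := by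
  intro m
  induction m with
  | zero =>
    intro _
    refine ⟨by simp, by simp, by simp, ?_⟩
    intro k
    simp [List.getD_eq_getElem?_getD, List.getElem?_replicate]
    split_ifs <;> simp
  | succ m ih =>
    intro hm
    rw [List.range_succ, List.foldl_append, List.foldl_cons, List.foldl_nil]
    exact step_inv prices m (by omega) _ _ (ih (by omega))

lemma finish_char (n : Nat) : ∀ (st : List Nat) (ans : List Int), (∀ j ∈ st, j < ans.length) →
    (altFinish n st ans).length = ans.length ∧
    ∀ k, (altFinish n st ans).getD k 0 =
      if k ∈ st then (n : Int) - 1 - (k : Int) else ans.getD k 0 := by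
  intro st
  induction st with
  | nil => intro ans _; simp [altFinish]
  | cons j t ih =>
    intro ans hst
    have hj : j < ans.length := hst j (by simp)
    have ht : ∀ x ∈ t, x < (ans.set j ((n : Int) - 1 - (j : Int))).length := by
      intro x hx; rw [List.length_set]; exact hst x (by simp [hx])
    obtain ⟨hlen, hch⟩ := ih (ans.set j ((n : Int) - 1 - (j : Int))) ht
    unfold altFinish
    refine ⟨by rw [hlen, List.length_set], ?_⟩
    intro k
    rw [hch k, getD_set' ans j k]
    by_cases hkt : k ∈ t
    · simp [hkt]
    · by_cases hkj : j = k
      · subst hkj; simp [hkt, hj]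
      · have hne : k ∉ j :: t := by
          intro hc
          rcases List.mem_cons.mp hc with rfl | hc'
          · exact hkj rfl
          · exact hkt hc'
        simp [hkt, hkj, hne]

lemma solution_alt_char (prices : List Int) :
    (solution_alt prices).length = prices.length ∧
    ∀ k, k < prices.length → (solution_alt prices).getD k 0 = specf prices k := by
  unfold solution_alt
  obtain ⟨hlen, hpw, hmem, hans⟩ := fold_inv prices prices.length le_rfl
  set S := (List.range prices.length).foldl
    (fun (st : List Nat × List Int) i =>
      let r := altPops prices i (prices.getD i 0) st.1 st.2
      (i :: r.1, r.2))
    ([], List.replicate prices.length 0) with hS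
  have hstlt : ∀ j ∈ S.1, j < S.2.length := by
    intro j hj; rw [hlen]; exact ((hmem j).mp hj).1
  obtain ⟨hflen, hfch⟩ := finish_char prices.length S.1 S.2 hstlt
  refine ⟨by rw [hflen, hlen], ?_⟩
  intro k hk
  rw [hfch k]
  by_cases hks : k ∈ S.1
  · obtain ⟨_, hnd⟩ := (hmem k).mp hks
    have hfd : fd prices k (k + 1) = none :=
      fd_none_of prices k (k + 1) (fun x hx hx' => hnd x (by omega) hx')
    rw [if_pos hks]
    unfold specf
    rw [hfd]
  · rw [if_neg hks, hans k, if_pos ⟨hk, hks⟩]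

-- ===== VERDICT (by name: the statement is the Claim_ definition above) =====
theorem solution_spec : Claim_equal_solution := by
  intro prices _
  unfold Spec_solution
  obtain ⟨hblen, hbch⟩ := solution_alt_char prices
  rw [solution_eq_map]
  apply List.ext_getElem
  · simp [hblen]
  · intro k hk hk'
    rw [List.length_map, List.length_range] at hk
    have h1 : ((List.range prices.length).map (specf prices))[k] = specf prices k := by
      simp [hk]
    have h2 : (solution_alt prices)[k] = (solution_alt prices).getD k 0 :=
      (List.getD_eq_getElem _ _ hk').symm
    rw [h1, h2, hbch k hk]
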